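-- pv_equiv track=rewrite | github.com/ohtaehyun/algo_study | programmers/lv2/make_prime_number_lv2.py | solution
-- ===== SOURCE A (Python) =====
-- from itertools import combinations
--
-- def getPrimes():
--     primes = [ True for i in range(3001)]
--     primes[0] = False
--     primes[1] = False
--     i = 2
--     while i**2 < 3000:
--         if primes[i] is True:
--             j = 2
--             while j*i < 3000:
--                 primes[j*i] = False
--                 j+=1
--         i+=1
--
--     return primes
--
-- def solution(nums):
--     answer = 0
--     primes = getPrimes()
--     combs = combinations(nums,3)
--     for c in combs :
--         if primes[sum(c)] is True:
--             answer+=1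
--     return answer
-- ===== SOURCE B (Python) =====
-- def getPrimes():
--     primes = [ True for i in range(3001)]
--     primes[0] = False
--     primes[1] = False
--     i = 2
--     while i**2 < 3000:
--         if primes[i] is True:
--             j = 2
--             while j*i < 3000:
--                 primes[j*i] = False
--                 j+=1
--         i+=1
--
--     return primes
--
-- def solution(nums):
--     # DP over sums: d1/d2/d3 map a sum to the number of 1/2/3-element
--     # index-subsets of the prefix seen so far having that sum.
--     primes = getPrimes()
--     d1, d2, d3 = {}, {}, {}
--     for x in nums:
--         for s, c in d2.items():
--             d3[s + x] = d3.get(s + x, 0) + c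
--         for s, c in d1.items():
--             d2[s + x] = d2.get(s + x, 0) + c
--         d1[x] = d1.get(x, 0) + 1
--     answer = 0
--     for s, c in d3.items():
--         if primes[s] is True:
--             answer += c
--     return answer
-- ===== Notes on version B (the rewrite author's own statement) =====
-- stated objective: faster
-- what changed: A enumerates all C(n,3) index triples and tests each sum against the sieve; B makes one pass keeping dictionaries that count 1-, 2- and 3-element subsets per attainable sum, then adds the counts of the sums the sieve marks prime.
import Mathlib
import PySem

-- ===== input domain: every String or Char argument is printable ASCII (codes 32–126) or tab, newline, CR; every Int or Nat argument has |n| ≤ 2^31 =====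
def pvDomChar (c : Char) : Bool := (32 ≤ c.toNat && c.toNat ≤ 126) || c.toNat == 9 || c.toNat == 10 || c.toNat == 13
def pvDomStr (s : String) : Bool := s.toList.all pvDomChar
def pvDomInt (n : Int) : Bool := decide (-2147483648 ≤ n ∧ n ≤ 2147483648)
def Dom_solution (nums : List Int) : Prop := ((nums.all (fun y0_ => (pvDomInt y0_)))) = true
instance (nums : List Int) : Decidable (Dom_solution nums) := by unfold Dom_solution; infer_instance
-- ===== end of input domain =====

-- B replaces A's O(n^3) scan of all 3-combinations by a one-pass DP over sums
-- (dictionaries counting 1-/2-/3-element subsets per sum); objective: faster.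


-- ===== PORT A =====
-- getPrimes: the sieve helper, identical in Source A and Source B (both modules carry it verbatim).
-- inner 'while j*i < 3000' loop; the fuel argument (3000 ≥ number of iterations) is a totality guard only
def pvMarkJ : Nat → List Bool → Nat → Nat → List Bool
  | 0, primes, _, _ => primes
  | fuel+1, primes, i, j =>
    if j * i < 3000 then pvMarkJ fuel (primes.set (j*i) false) i (j+1) else primes

-- outer 'while i**2 < 3000' loop; fuel 60 ≥ number of iterations (totality guard only)
def pvSieveLoop : Nat → List Bool → Nat → List Bool
  | 0, primes, _ => primes
  | fuel+1, primes, i =>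
    if i * i < 3000 then
      pvSieveLoop fuel
        (if PySem.List.pyGet? primes (i : Int) = some true then pvMarkJ 3000 primes i 2 else primes)
        (i+1)
    else primes

def getPrimes : List Bool :=
  pvSieveLoop 60 (((List.replicate 3001 true).set 0 false).set 1 false) 2

-- itertools.combinations(nums, 2) / (nums, 3), in itertools' lexicographic-by-index order
def pvComb2 : List Int → List (Int × Int)
  | [] => []
  | x :: xs => (xs.map (fun y => (x, y))) ++ pvComb2 xs

def pvComb3 : List Int → List (Int × Int × Int)
  | [] => []
  | x :: xs => ((pvComb2 xs).map (fun p => (x, p.1, p.2))) ++ pvComb3 xs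

def solution (nums : List Int) : Int :=
  (pvComb3 nums).foldl
    (fun answer c =>
      if PySem.List.pyGet? getPrimes (c.1 + c.2.1 + c.2.2) = some true then answer + 1 else answer)
    0

-- ===== PORT B =====
-- 'for s, c in src.items(): tgt[s+x] = tgt.get(s+x, 0) + c'
def pvAddInto (x : Int) (src tgt : PySem.Dict Int Int) : PySem.Dict Int Int :=
  src.items.foldl (fun dd sc => dd.insert (sc.1 + x) (dd.getD (sc.1 + x) 0 + sc.2)) tgt

-- the body of B's 'for x in nums' loop: update d3 from the old d2, d2 from the old d1, then d1
def pvDpStep (st : PySem.Dict Int Int × PySem.Dict Int Int × PySem.Dict Int Int) (x : Int) :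
    PySem.Dict Int Int × PySem.Dict Int Int × PySem.Dict Int Int :=
  (st.1.insert x (st.1.getD x 0 + 1), pvAddInto x st.1 st.2.1, pvAddInto x st.2.1 st.2.2)

def solution_alt (nums : List Int) : Int :=
  (nums.foldl pvDpStep (PySem.Dict.empty, PySem.Dict.empty, PySem.Dict.empty)).2.2.items.foldl
    (fun answer sc =>
      if PySem.List.pyGet? getPrimes sc.1 = some true then answer + sc.2 else answer)
    0

-- ===== PRECONDITION & SPEC =====
-- Pre_ excludes exactly the inputs on which Python A raises IndexError: some 3-combination
-- whose sum is below -3001 or above 3000, i.e. outside the index range of the length-3001 sieve list.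
def Pre_solution (nums : List Int) : Prop :=
  ∀ t ∈ nums.sublistsLen 3, -3001 ≤ t.sum ∧ t.sum ≤ 3000
instance (nums : List Int) : Decidable (Pre_solution nums) := by unfold Pre_solution; infer_instance

def pvWitness_solution : List Int := [2, 3, 5, -1]

def Spec_solution (nums : List Int) (out : Int) : Prop := out = solution_alt nums
instance (nums : List Int) (out : Int) : Decidable (Spec_solution nums out) := by unfold Spec_solution; infer_instance

-- ===== CLAIM (what is proved, stated in full; the proofs are below) =====
def Claim_equal_solution : Prop := ∀ (nums : List Int), Dom_solution nums → Pre_solution nums → Spec_solution nums (solution nums)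

-- ===== LEMMAS AND PROOFS =====

-- the per-sum criterion both programs test: 'primes[s] is True'
def pvG (s : Int) : Bool := decide (PySem.List.pyGet? getPrimes s = some true)

-- multiset of sums of 2-/3-element index-subsets, in pvComb order
def pvPairs : List Int → List Int
  | [] => []
  | x :: xs => (xs.map (fun y => x + y)) ++ pvPairs xs

def pvTriples : List Int → List Int
  | [] => []
  | x :: xs => ((pvPairs xs).map (fun p => x + p)) ++ pvTriples xs

lemma pvCountP_comb2 (l : List Int) (h : Int → Bool) :
    (pvComb2 l).countP (fun p => h (p.1 + p.2)) = (pvPairs l).countP h := by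
  induction l with
  | nil => rfl
  | cons x xs ih =>
    simp [pvComb2, pvPairs, List.countP_append, List.countP_map, ih, Function.comp_def]

lemma pvCountP_comb3 (l : List Int) (h : Int → Bool) :
    (pvComb3 l).countP (fun t => h (t.1 + t.2.1 + t.2.2)) = (pvTriples l).countP h := by
  induction l with
  | nil => rfl
  | cons x xs ih =>
    simp only [pvComb3, pvTriples, List.countP_append, List.countP_map, ih, Function.comp_def]
    congr 1
    rw [← pvCountP_comb2 xs (fun s => h (x + s))]
    apply List.countP_congr
    intro p _
    simp [add_assoc]

lemma pv_solution_eq_countP (nums : List Int) :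
    solution nums = ((pvTriples nums).countP pvG : Int) := by
  unfold solution
  have hfun : (fun (answer : Int) (c : Int × Int × Int) =>
      if PySem.List.pyGet? getPrimes (c.1 + c.2.1 + c.2.2) = some true then answer + 1 else answer)
      = (fun answer c => if pvG (c.1 + c.2.1 + c.2.2) = true then answer + 1 else answer) := by
    funext a c; simp [pvG]
  rw [hfun, PySem.List.foldl_count_if, pvCountP_comb3]
  simp

-- first-match lookup in an association list (items of a dict), default 0
def pvAlook : List (Int × Int) → Int → Int
  | [], _ => 0
  | p :: rest, k => if p.1 = k then p.2 else pvAlook rest k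

lemma pvAlook_of_not_mem (ps : List (Int × Int)) (k : Int) (h : k ∉ ps.map (·.1)) :
    pvAlook ps k = 0 := by
  induction ps with
  | nil => rfl
  | cons p rest ih =>
    simp only [List.map_cons, List.mem_cons] at h
    push_neg at h
    simp [pvAlook, ih h.2, Ne.symm h.1]

lemma pvAlook_of_mem (ps : List (Int × Int)) (k v : Int)
    (hnd : (ps.map (·.1)).Nodup) (hm : (k, v) ∈ ps) : pvAlook ps k = v := by
  induction ps with
  | nil => simp at hm
  | cons p rest ih =>
    simp only [List.map_cons, List.nodup_cons] at hnd
    rcases List.mem_cons.mp hm with h | h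
    · subst h; simp [pvAlook]
    · have hne : p.1 ≠ k := by
        intro he
        exact hnd.1 (he ▸ (List.mem_map.mpr ⟨(k, v), h, rfl⟩))
      simp [pvAlook, hne, ih hnd.2 h]

lemma pv_keys_eq (d : PySem.Dict Int Int) : d.keys = d.items.map (·.1) := by
  simp only [PySem.Dict.keys]

lemma pvGetD_eq_alook (d : PySem.Dict Int Int) (hnd : d.keys.Nodup) (k : Int) :
    d.getD k 0 = pvAlook d.items k := by
  by_cases hc : k ∈ d.keys
  · rw [pv_keys_eq] at hc
    obtain ⟨p, hp, hk⟩ := List.mem_map.mp hc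
    obtain ⟨k', v⟩ := p
    cases hk
    rw [PySem.Dict.getD_of_mem_items d hp hnd, pvAlook_of_mem _ _ _ (pv_keys_eq d ▸ hnd) hp]
  · rw [PySem.Dict.getD_of_get?_eq_none d 0 ((PySem.Dict.get?_eq_none_iff_not_mem_keys d k).mpr hc),
      pvAlook_of_not_mem _ _ (by rwa [pv_keys_eq] at hc)]

lemma pvGetD_addInto_items (x t : Int) :
    ∀ (ps : List (Int × Int)) (d : PySem.Dict Int Int), (ps.map (·.1)).Nodup →
    (ps.foldl (fun dd sc => dd.insert (sc.1 + x) (dd.getD (sc.1 + x) 0 + sc.2)) d).getD t 0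
      = d.getD t 0 + pvAlook ps (t - x) := by
  intro ps
  induction ps with
  | nil => intro d _; simp [pvAlook]
  | cons sc rest ih =>
    intro d hnd
    simp only [List.map_cons, List.nodup_cons] at hnd
    simp only [List.foldl_cons]
    rw [ih _ hnd.2]
    by_cases ht : t = sc.1 + x
    · have h1 : (d.insert (sc.1 + x) (d.getD (sc.1 + x) 0 + sc.2)).getD t 0
          = d.getD (sc.1 + x) 0 + sc.2 := by
        rw [PySem.Dict.getD_insert]; simp [ht]
      have h2 : pvAlook rest (t - x) = 0 := by
        have he : t - x = sc.1 := by omega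
        exact pvAlook_of_not_mem _ _ (he ▸ hnd.1)
      have h3 : pvAlook (sc :: rest) (t - x) = sc.2 := by
        have : sc.1 = t - x := by omega
        simp [pvAlook, this]
      rw [h1, h2, h3, ht]; ring
    · have h1 : (d.insert (sc.1 + x) (d.getD (sc.1 + x) 0 + sc.2)).getD t 0 = d.getD t 0 := by
        rw [PySem.Dict.getD_insert]; simp [ht]
      have h2 : pvAlook (sc :: rest) (t - x) = pvAlook rest (t - x) := by
        have : sc.1 ≠ t - x := by omega
        simp [pvAlook, this]
      rw [h1, h2]

lemma pvGetD_addInto (x t : Int) (src tgt : PySem.Dict Int Int)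
    (hsrc : src.keys.Nodup) (_htgt : tgt.keys.Nodup) :
    (pvAddInto x src tgt).getD t 0 = tgt.getD t 0 + src.getD (t - x) 0 := by
  unfold pvAddInto
  rw [pvGetD_addInto_items x t src.items tgt (pv_keys_eq src ▸ hsrc),
    pvGetD_eq_alook src hsrc]

lemma pvNodup_addInto (x : Int) (src tgt : PySem.Dict Int Int) (htgt : tgt.keys.Nodup) :
    (pvAddInto x src tgt).keys.Nodup :=
  PySem.Dict.nodup_keys_foldl_insert_key src.items (fun sc => sc.1 + x)
    (fun dd sc => dd.getD (sc.1 + x) 0 + sc.2) tgt htgt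

lemma pvCount_pairs_append (p : List Int) (x s : Int) :
    (pvPairs (p ++ [x])).count s = (pvPairs p).count s + p.count (s - x) := by
  induction p with
  | nil => rfl
  | cons a rest ih =>
    simp only [List.cons_append, pvPairs, List.count_append, List.map_append, List.map_cons,
      List.map_nil, ih]
    have h2 : ((a :: rest).count (s - x)) = rest.count (s - x) + (if s - x = a then 1 else 0) := by
      by_cases h : s - x = a
      · simp [h, List.count_cons]
      · simp [h, List.count_cons]
        omega
    have h3 : ([a + x].count s) = (if s = a + x then 1 else 0) := by
      by_cases h : s = a + x
      · simp [h]
      · rw [if_neg h, List.count_eq_zero]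
        simp [h]
    have hiff : (s = a + x) ↔ (s - x = a) := by omega
    rw [h2, h3]
    simp only [hiff]
    split_ifs <;> omega

lemma pvCount_map_add (a s : Int) (l : List Int) :
    (l.map (fun y => a + y)).count s = l.count (s - a) := by
  have hinj : Function.Injective (fun y => a + y) := fun u v h => by simpa using h
  have := List.count_map_of_injective l (fun y => a + y) hinj (s - a)
  simpa using this

lemma pvCount_triples_append (p : List Int) (x s : Int) :
    (pvTriples (p ++ [x])).count s = (pvTriples p).count s + (pvPairs p).count (s - x) := by
  induction p with
  | nil => simp [pvTriples, pvPairs]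
  | cons a rest ih =>
    simp only [List.cons_append, pvTriples, pvPairs, List.count_append, ih,
      pvCount_map_add, pvCount_pairs_append]
    have : s - a - x = s - x - a := by omega
    rw [this]; omega

-- the DP invariant: after processing prefix p, d1/d2/d3 count elements / pair sums / triple sums of p
def pvInv (p : List Int) (st : PySem.Dict Int Int × PySem.Dict Int Int × PySem.Dict Int Int) : Prop :=
  st.1.keys.Nodup ∧ st.2.1.keys.Nodup ∧ st.2.2.keys.Nodup ∧
  (∀ s, st.1.getD s 0 = (p.count s : Int)) ∧
  (∀ s, st.2.1.getD s 0 = ((pvPairs p).count s : Int)) ∧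
  (∀ s, st.2.2.getD s 0 = ((pvTriples p).count s : Int))

lemma pvInv_step (p : List Int) (x : Int) (st) (h : pvInv p st) :
    pvInv (p ++ [x]) (pvDpStep st x) := by
  obtain ⟨h1, h2, h3, hc1, hc2, hc3⟩ := h
  refine ⟨?_, pvNodup_addInto _ _ _ h2, pvNodup_addInto _ _ _ h3, ?_, ?_, ?_⟩
  · exact PySem.Dict.nodup_keys_foldl_insert_key [x] id (fun d y => d.getD y 0 + 1) st.1 h1
  · intro s
    simp only [pvDpStep, PySem.Dict.getD_insert]
    rw [List.count_append, List.count_singleton]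
    by_cases hs : s = x
    · simp [hs, hc1 x]
    · have hxs : ¬ x = s := fun h => hs h.symm
      simp [hs, hc1 s, hxs]
  · intro s
    simp only [pvDpStep]
    rw [pvGetD_addInto x s st.1 st.2.1 h1 h2, hc2 s, hc1 (s - x), pvCount_pairs_append]
    push_cast; ring
  · intro s
    simp only [pvDpStep]
    rw [pvGetD_addInto x s st.2.1 st.2.2 h2 h3, hc3 s, hc2 (s - x), pvCount_triples_append]
    push_cast; ring

lemma pvInv_foldl : ∀ (l p : List Int) (st), pvInv p st → pvInv (p ++ l) (l.foldl pvDpStep st) := by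
  intro l
  induction l with
  | nil => intro p st h; simpa using h
  | cons x l' ih =>
    intro p st h
    have := ih (p ++ [x]) (pvDpStep st x) (pvInv_step p x st h)
    simpa [List.append_assoc] using this

lemma pvInv_init : pvInv [] (PySem.Dict.empty, PySem.Dict.empty, PySem.Dict.empty) := by
  refine ⟨PySem.Dict.nodup_keys_empty, PySem.Dict.nodup_keys_empty, PySem.Dict.nodup_keys_empty, ?_, ?_, ?_⟩ <;>
    intro s <;> simp [PySem.Dict.getD_empty, pvPairs, pvTriples]

lemma pvFoldl_if_sum (ps : List (Int × Int)) (a : Int) :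
    ps.foldl (fun acc sc => if pvG sc.1 then acc + sc.2 else acc) a
      = a + (ps.map (fun sc => if pvG sc.1 then sc.2 else 0)).sum := by
  induction ps generalizing a with
  | nil => simp
  | cons sc rest ih =>
    simp only [List.foldl_cons, List.map_cons, List.sum_cons, ih]
    by_cases h : pvG sc.1 <;> simp [h] <;> ring

lemma pvSum_not_mem (x : Int) (c : Int → Int) :
    ∀ (K : List Int), x ∉ K → (K.map (fun k => if k = x then c k else 0)).sum = 0 := by
  intro K
  induction K with
  | nil => simp
  | cons a rest ih =>
    intro h
    simp only [List.mem_cons] at h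
    push_neg at h
    simp [Ne.symm h.1, ih h.2]

lemma pvSum_single (x : Int) (c : Int → Int) :
    ∀ (K : List Int), K.Nodup → x ∈ K → (K.map (fun k => if k = x then c k else 0)).sum = c x := by
  intro K
  induction K with
  | nil => simp
  | cons a rest ih =>
    intro hnd hm
    simp only [List.nodup_cons] at hnd
    rcases List.mem_cons.mp hm with h | h
    · subst h
      simp [pvSum_not_mem x c rest hnd.1]
    · have hne : a ≠ x := fun he => hnd.1 (he ▸ h)
      simp [hne, ih hnd.2 h]

lemma pvKey_sum (K : List Int) (hnd : K.Nodup) :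
    ∀ (L : List Int), (∀ s ∈ L, s ∈ K) →
    (K.map (fun k => if pvG k then (L.count k : Int) else 0)).sum = (L.countP pvG : Int) := by
  intro L
  induction L with
  | nil => simp
  | cons x L' ih =>
    intro hsub
    have hx : x ∈ K := hsub x (by simp)
    have hsub' : ∀ s ∈ L', s ∈ K := fun s hs => hsub s (by simp [hs])
    have hfun : (fun k => if pvG k then (((x :: L').count k : Nat) : Int) else 0)
        = (fun k => (if pvG k then ((L'.count k : Nat) : Int) else 0)
            + (if k = x then (if pvG k then 1 else 0) else 0)) := by
      funext k
      by_cases hk : k = x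
      · subst hk
        split_ifs <;> simp_all [List.count_cons]
      · simp [hk, Ne.symm hk]
    rw [hfun, PySem.List.sum_map_add_int, ih hsub',
      pvSum_single x (fun k => if pvG k then 1 else 0) K hnd hx, List.countP_cons]
    by_cases hg : pvG x <;> simp [hg] <;> push_cast <;> omega

lemma pvMap_values (L : List Int) :
    ∀ (ps : List (Int × Int)), (∀ sc ∈ ps, sc.2 = (L.count sc.1 : Int)) →
    ps.map (fun sc => if pvG sc.1 then sc.2 else 0)
      = (ps.map (·.1)).map (fun k => if pvG k then (L.count k : Int) else 0) := by
  intro ps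
  induction ps with
  | nil => simp
  | cons sc rest ih =>
    intro h
    have h1 := h sc (by simp)
    simp only [List.map_cons]
    rw [ih (fun sc' hm => h sc' (by simp [hm])), h1]

lemma pv_solution_alt_eq_countP (nums : List Int) :
    solution_alt nums = ((pvTriples nums).countP pvG : Int) := by
  unfold solution_alt
  have hinv : pvInv nums (nums.foldl pvDpStep (PySem.Dict.empty, PySem.Dict.empty, PySem.Dict.empty)) := by
    have := pvInv_foldl nums [] _ pvInv_init
    simpa using this
  set st := nums.foldl pvDpStep (PySem.Dict.empty, PySem.Dict.empty, PySem.Dict.empty) with hst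
  obtain ⟨_, _, h3, _, _, hc3⟩ := hinv
  have hfun : (fun (answer : Int) (sc : Int × Int) =>
      if PySem.List.pyGet? getPrimes sc.1 = some true then answer + sc.2 else answer)
      = (fun answer sc => if pvG sc.1 then answer + sc.2 else answer) := by
    funext a sc; simp [pvG]
  rw [hfun, pvFoldl_if_sum]
  have hvals : ∀ sc ∈ st.2.2.items, sc.2 = ((pvTriples nums).count sc.1 : Int) := by
    intro sc hm
    have : st.2.2.getD sc.1 0 = sc.2 := by
      obtain ⟨k, v⟩ := sc
      exact PySem.Dict.getD_of_mem_items st.2.2 hm h3 0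
    rw [← this, hc3]
  have hsub : ∀ s ∈ pvTriples nums, s ∈ st.2.2.items.map (·.1) := by
    intro s hs
    by_contra hns
    have h0 : st.2.2.getD s 0 = 0 := by
      rw [pvGetD_eq_alook st.2.2 h3, pvAlook_of_not_mem _ _ hns]
    rw [hc3 s] at h0
    have : 0 < (pvTriples nums).count s := List.count_pos_iff.mpr hs
    omega
  rw [pvMap_values (pvTriples nums) st.2.2.items hvals,
    pvKey_sum (st.2.2.items.map (·.1)) (pv_keys_eq st.2.2 ▸ h3) (pvTriples nums) hsub]
  simp

-- ===== VERDICT (by name: the statement is the Claim_ definition above) =====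
theorem solution_spec : Claim_equal_solution := by
  intro nums _ _
  unfold Spec_solution
  rw [pv_solution_eq_countP, pv_solution_alt_eq_countP]
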